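-- pv_equiv track=rewrite | github.com/ChristopherMichael-Stokes/AoC2020 | day14/solution.py | permutate_address
-- ===== SOURCE A (Python) =====
-- def permutate_address(address, idxs):
--     # depth first function to return all variations of the input bits at input idxs
--     # returns 2**len(idxs) unique values
--     # N.B. does not scale well with the amount of idxs, although is is no problem
--     # for the input questions.
--     # A solution would be to refactor into left recursion then use memoisation
--     if len(idxs) == 1:
--         idx, rest = idxs[0], None
--     else:
--         idx, rest = idxs[0], idxs[1:]
--
--     addr_1 = address | (1 << idx)
--     if len(idxs) == 1:
--         return [addr_1]
--     else:
--         return [addr_1] + permutate_address(addr_1, rest) + permutate_address(address, rest)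
-- ===== SOURCE B (Python) =====
-- def permutate_address(address, idxs):
--     # iterative DFS with an explicit LIFO stack; same pre-order emission as the
--     # recursive original (set-bit branch pushed last so it is expanded first)
--     out = []
--     stack = [(address, idxs)]
--     while stack:
--         addr, rest = stack.pop()
--         addr_1 = addr | (1 << rest[0])
--         out.append(addr_1)
--         tail = rest[1:]
--         if tail:
--             stack.append((addr, tail))
--             stack.append((addr_1, tail))
--     return out
-- ===== Notes on version B (the rewrite author's own statement) =====
-- stated objective: alternative
-- what changed: Replaces the binary recursion with an iterative depth-first traversal over an explicit LIFO work stack (set-bit branch pushed last so it expands first), appending to one output list instead of concatenating recursive results.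
import Mathlib
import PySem

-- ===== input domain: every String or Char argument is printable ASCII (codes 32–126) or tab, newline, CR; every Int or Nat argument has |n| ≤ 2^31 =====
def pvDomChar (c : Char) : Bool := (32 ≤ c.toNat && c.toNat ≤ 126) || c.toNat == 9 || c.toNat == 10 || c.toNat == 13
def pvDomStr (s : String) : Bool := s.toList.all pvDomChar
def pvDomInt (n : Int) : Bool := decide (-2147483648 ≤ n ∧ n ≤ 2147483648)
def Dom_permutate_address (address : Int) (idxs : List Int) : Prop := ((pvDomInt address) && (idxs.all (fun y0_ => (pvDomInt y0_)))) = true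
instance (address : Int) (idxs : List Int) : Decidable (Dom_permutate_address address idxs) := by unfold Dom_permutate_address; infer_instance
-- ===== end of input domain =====

-- B replaces A's binary recursion by an iterative DFS over an explicit LIFO work stack
-- (alternative decomposition, same output order and cost).

-- ===== PORT A =====
-- A: if len(idxs)==1 return [addr_1] else [addr_1] + rec(addr_1, idxs[1:]) + rec(address, idxs[1:])
def permutate_address (address : Int) (idxs : List Int) : List Int :=
  match idxs with
  | [] => []        -- unreachable under Pre_ (Python raises IndexError on idxs[0])
  | [idx] => [PySem.Int.bor address ((1 : Int) <<< idx.toNat)]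
  | idx :: rest =>
    let addr_1 := PySem.Int.bor address ((1 : Int) <<< idx.toNat)
    [addr_1] ++ permutate_address addr_1 rest ++ permutate_address address rest

-- ===== PORT B =====
-- B's while loop: pop (addr, rest); emit addr_1 = addr | (1 << rest[0]); if tail = rest[1:]
-- is nonempty, push (addr, tail) then (addr_1, tail). `out` is the growing output list.
def permutate_address_alt_loop (stack : List (Int × List Int)) (out : List Int) : List Int :=
  match stack with
  | [] => out
  | (addr, rest) :: stack' =>
    match rest with
    | [] => permutate_address_alt_loop stack' out   -- unreachable under Pre_ (Python raises IndexError on rest[0])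
    | r0 :: tail =>
      let addr_1 := PySem.Int.bor addr ((1 : Int) <<< r0.toNat)
      match tail with
      | [] => permutate_address_alt_loop stack' (out ++ [addr_1])
      | t :: ts => permutate_address_alt_loop ((addr_1, t :: ts) :: (addr, t :: ts) :: stack') (out ++ [addr_1])
termination_by (stack.map (fun p => 3 ^ p.2.length)).sum
decreasing_by
  all_goals simp [List.length_cons, pow_succ]
  all_goals (have h1 : 0 < 3 ^ ts.length := by positivity); omega

def permutate_address_alt (address : Int) (idxs : List Int) : List Int :=
  permutate_address_alt_loop [(address, idxs)] []

-- ===== PRECONDITION & SPEC =====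
-- Pre_ excludes exactly the inputs on which A raises: empty idxs (IndexError on idxs[0])
-- and negative indices (ValueError from 1 << idx); B raises there too.
def Pre_permutate_address (_address : Int) (idxs : List Int) : Prop :=
  idxs ≠ [] ∧ ∀ i ∈ idxs, 0 ≤ i
instance (address : Int) (idxs : List Int) : Decidable (Pre_permutate_address address idxs) := by unfold Pre_permutate_address; infer_instance

def pvWitness_permutate_address : Int × List Int := (5, [1, 3])

def Spec_permutate_address (address : Int) (idxs : List Int) (out : List Int) : Prop := out = permutate_address_alt address idxs
instance (address : Int) (idxs : List Int) (out : List Int) : Decidable (Spec_permutate_address address idxs out) := by unfold Spec_permutate_address; infer_instance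

-- ===== CLAIM (what is proved, stated in full; the proofs are below) =====
def Claim_equal_permutate_address : Prop := ∀ (address : Int) (idxs : List Int), Dom_permutate_address address idxs → Pre_permutate_address address idxs → Spec_permutate_address address idxs (permutate_address address idxs)

-- ===== LEMMAS AND PROOFS =====

-- The stack loop appends, for each pending work item in stack order, exactly A's recursive output.
lemma alt_loop_spec (stack : List (Int × List Int)) (out : List Int)
    (h : ∀ p ∈ stack, p.2 ≠ []) :
    permutate_address_alt_loop stack out
      = out ++ (stack.map (fun p => permutate_address p.1 p.2)).flatten := by
  fun_induction permutate_address_alt_loop stack out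
  case case1 => simp
  case case2 out addr stack' ih => exact absurd rfl (h (addr, []) (by simp))
  case case3 out addr stack' r0 addr_1 ih =>
    rw [ih (fun p hp => h p (List.mem_cons_of_mem _ hp))]
    simp [permutate_address, addr_1]
  case case4 =>
    rename_i out addr stack' r0 addr_1 t ts ih
    rw [ih (by
      intro p hp
      simp only [List.mem_cons] at hp
      rcases hp with hp | hp | hp
      · simp [hp]
      · simp [hp]
      · exact h p (List.mem_cons_of_mem _ hp))]
    simp [permutate_address, addr_1]

-- ===== VERDICT (by name: the statement is the Claim_ definition above) =====
theorem permutate_address_spec : Claim_equal_permutate_address := by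
  intro address idxs _ hpre
  unfold Spec_permutate_address permutate_address_alt
  rw [alt_loop_spec [(address, idxs)] [] (by simpa using hpre.1)]
  simp
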